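-- pv_equiv track=rewrite | github.com/nitin-ebi/eva-tasks | tasks/eva_3754/categorise_duplicate_candidates.py | are_taxonomy_consistent
-- ===== SOURCE A (Python) =====
-- import itertools
--
-- def are_taxonomy_consistent(sve_map):
--     taxonomy_set_list = []
--     for sve_group in sve_map:
--         taxonomy_set_list.append(set(sve.get('taxonomy') for sve in sve_map[sve_group]))
--     for taxonomy_set1, taxonomy_set2 in itertools.combinations(taxonomy_set_list, 2):
--         if not taxonomy_set1.intersection(taxonomy_set2):
--             return False
--     return True
-- ===== SOURCE B (Python) =====
-- def are_taxonomy_consistent(sve_map):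
--     groups = [set(sve.get('taxonomy') for sve in sves) for sves in sve_map.values()]
--     n = len(groups)
--     buckets = {}
--     for i, group in enumerate(groups):
--         for taxonomy in group:
--             buckets.setdefault(taxonomy, []).append(i)
--     covered = set()
--     for idxs in buckets.values():
--         for i in idxs:
--             for j in idxs:
--                 if i < j:
--                     covered.add((i, j))
--     return len(covered) == n * (n - 1) // 2
-- ===== Notes on version B (the rewrite author's own statement) =====
-- stated objective: alternative
-- what changed: Replaces the pairwise set-intersection scan over all group pairs with an inverted index (taxonomy -> group indices) from which the set of intersecting unordered index pairs is collected and its size compared with n*(n-1)//2.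
import Mathlib
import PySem

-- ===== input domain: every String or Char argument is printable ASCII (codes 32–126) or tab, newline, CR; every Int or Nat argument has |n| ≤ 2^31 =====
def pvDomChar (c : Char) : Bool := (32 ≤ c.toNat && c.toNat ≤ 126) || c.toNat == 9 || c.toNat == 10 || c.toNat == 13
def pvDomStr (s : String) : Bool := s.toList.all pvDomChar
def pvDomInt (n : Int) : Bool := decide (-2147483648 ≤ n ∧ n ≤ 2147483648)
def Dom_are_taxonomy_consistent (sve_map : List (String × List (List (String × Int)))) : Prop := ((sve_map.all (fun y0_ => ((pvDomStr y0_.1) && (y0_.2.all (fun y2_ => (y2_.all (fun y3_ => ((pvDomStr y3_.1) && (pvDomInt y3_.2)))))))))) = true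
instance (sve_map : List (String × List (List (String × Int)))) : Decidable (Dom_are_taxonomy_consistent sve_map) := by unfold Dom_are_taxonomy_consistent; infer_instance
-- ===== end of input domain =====

-- B replaces A's pairwise set-intersection scan by an inverted index taxonomy → group
-- indices, collecting the set of intersecting index pairs and comparing its size with
-- n*(n-1)//2 (alternative decomposition, same worst-case cost).

-- ===== PORT A =====
def are_taxonomy_consistent (sve_map : List (String × List (List (String × Int)))) : Bool :=
  -- taxonomy_set_list = []; for sve_group in sve_map: append set(sve.get('taxonomy') for sve in sve_map[sve_group])
  let taxonomy_set_list : List (PySem.Set (Option Int)) :=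
    sve_map.foldl (fun acc sve_group =>
      acc ++ [PySem.Set.ofList (sve_group.2.map
        (fun sve => PySem.Dict.get? (PySem.Dict.mk sve) "taxonomy"))]) []
  -- for taxonomy_set1, taxonomy_set2 in itertools.combinations(taxonomy_set_list, 2):
  --     if not taxonomy_set1.intersection(taxonomy_set2): return False
  -- return True
  (PySem.List.combinations taxonomy_set_list 2).foldl (fun ok pr =>
    match pr with
    | [taxonomy_set1, taxonomy_set2] =>
        if PySem.Set.inter taxonomy_set1 taxonomy_set2 = [] then false else ok
    | _ => ok) true

-- ===== PORT B =====
def are_taxonomy_consistent_alt (sve_map : List (String × List (List (String × Int)))) : Bool :=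
  -- groups = [set(sve.get('taxonomy') for sve in sves) for sves in sve_map.values()]
  let groups : List (PySem.Set (Option Int)) :=
    sve_map.map (fun sves => PySem.Set.ofList (sves.2.map
      (fun sve => PySem.Dict.get? (PySem.Dict.mk sve) "taxonomy")))
  let n : Int := groups.length
  -- buckets = {}; for i, group in enumerate(groups): for taxonomy in group: buckets.setdefault(taxonomy, []).append(i)
  let buckets : PySem.Dict (Option Int) (List Int) :=
    (PySem.List.enumerate groups).foldl (fun d ig =>
      ig.2.foldl (fun d taxonomy => d.modify taxonomy [] (fun l => l ++ [ig.1])) d)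
      PySem.Dict.empty
  -- covered = set(); for idxs in buckets.values(): for i in idxs: for j in idxs: if i < j: covered.add((i, j))
  let covered : PySem.Set (Int × Int) :=
    buckets.values.foldl (fun cov idxs =>
      idxs.foldl (fun cov i =>
        idxs.foldl (fun cov j =>
          if i < j then PySem.Set.add cov (i, j) else cov) cov) cov)
      PySem.Set.empty
  -- return len(covered) == n * (n - 1) // 2
  decide ((covered.length : Int) = PySem.Int.floordiv (n * (n - 1)) 2)

-- ===== PRECONDITION & SPEC =====
def Spec_are_taxonomy_consistent (sve_map : List (String × List (List (String × Int)))) (out : Bool) : Prop := out = are_taxonomy_consistent_alt sve_map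
instance (sve_map : List (String × List (List (String × Int)))) (out : Bool) : Decidable (Spec_are_taxonomy_consistent sve_map out) := by unfold Spec_are_taxonomy_consistent; infer_instance

-- ===== CLAIM (what is proved, stated in full; the proofs are below) =====
def Claim_equal_are_taxonomy_consistent : Prop := ∀ (sve_map : List (String × List (List (String × Int)))), Dom_are_taxonomy_consistent sve_map → Spec_are_taxonomy_consistent sve_map (are_taxonomy_consistent sve_map)

-- ===== LEMMAS AND PROOFS =====

-- the shared property: two taxonomy sets intersect
def pvShare (s t : PySem.Set (Option Int)) : Prop := PySem.Set.inter s t ≠ []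

-- ---- A-side: the combinations loop decides pairwise intersection ----
lemma a_fold_iff (gs : List (PySem.Set (Option Int))) :
    ((PySem.List.combinations gs 2).foldl (fun ok pr =>
      match pr with
      | [s1, s2] => if PySem.Set.inter s1 s2 = [] then false else ok
      | _ => ok) true) = true ↔ gs.Pairwise pvShare := by
  have hstep : (fun (ok : Bool) (pr : List (PySem.Set (Option Int))) =>
      match pr with
      | [s1, s2] => if PySem.Set.inter s1 s2 = [] then false else ok
      | _ => ok) = (fun ok pr =>
        if (match pr with
            | [s1, s2] => decide (PySem.Set.inter s1 s2 = [])
            | _ => false) = true then false else ok) := by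
    funext ok pr
    rcases pr with _ | ⟨s1, _ | ⟨s2, _ | t⟩⟩
    · rfl
    · rfl
    · by_cases h : PySem.Set.inter s1 s2 = [] <;> simp [h]
    · rfl
  rw [hstep, PySem.List.foldl_if_false_eq]
  simp only [Bool.true_and, Bool.not_eq_eq_eq_not, Bool.not_true, List.any_eq_false,
    Bool.not_eq_true]
  constructor
  · intro h
    refine List.pairwise_iff_forall_sublist.mpr ?_
    intro a b hsl hempty
    have hmem : [a, b] ∈ PySem.List.combinations gs 2 :=
      (PySem.List.mem_combinations_iff gs 2 [a, b]).mpr ⟨hsl, rfl⟩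
    have := h _ hmem
    simp [hempty] at this
  · intro hpw pr hmem
    obtain ⟨hsl, hlen⟩ := (PySem.List.mem_combinations_iff gs 2 pr).mp hmem
    rcases pr with _ | ⟨a, _ | ⟨b, _ | t⟩⟩ <;> simp_all
    exact List.pairwise_iff_forall_sublist.mp hpw hsl

-- ---- B-side helpers ----
def pvPairsL (gs : List (PySem.Set (Option Int))) : List (Option Int × Int) :=
  (PySem.List.enumerate gs).flatMap (fun ig => ig.2.map (fun t => (t, ig.1)))

def pvBuckets (gs : List (PySem.Set (Option Int))) : PySem.Dict (Option Int) (List Int) :=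
  (PySem.List.enumerate gs).foldl (fun d ig =>
    ig.2.foldl (fun d taxonomy => d.modify taxonomy [] (fun l => l ++ [ig.1])) d)
    PySem.Dict.empty

def pvCovered (gs : List (PySem.Set (Option Int))) : PySem.Set (Int × Int) :=
  (pvBuckets gs).values.foldl (fun cov idxs =>
    idxs.foldl (fun cov i =>
      idxs.foldl (fun cov j =>
        if i < j then PySem.Set.add cov (i, j) else cov) cov) cov)
    PySem.Set.empty

def pvAllPairs (n : Nat) : List (Int × Int) :=
  (List.range n).flatMap (fun b => (List.range b).map (fun (a : Nat) => ((a : Int), (b : Int))))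

lemma mem_enumerate {α : Type} (l : List α) (s : Int) (p : Int × α) :
    p ∈ PySem.List.enumerate l s ↔ ∃ k : Nat, ∃ h : k < l.length, p = (s + k, l[k]) := by
  induction l generalizing s with
  | nil => simp [PySem.List.enumerate]
  | cons x t ih =>
    simp only [PySem.List.enumerate, List.mem_cons, ih]
    constructor
    · rintro (rfl | ⟨k, hk, rfl⟩)
      · exact ⟨0, by simp, by simp⟩
      · exact ⟨k + 1, by simpa using hk,
          by simp only [Prod.mk.injEq, List.getElem_cons_succ]; exact ⟨by push_cast; ring, trivial⟩⟩
    · rintro ⟨k, hk, rfl⟩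
      cases k with
      | zero => exact Or.inl (by simp)
      | succ k =>
        refine Or.inr ⟨k, by simpa using hk, ?_⟩
        simp only [Prod.mk.injEq, List.getElem_cons_succ]
        exact ⟨by push_cast; ring, trivial⟩

lemma buckets_eq_flat (gs : List (PySem.Set (Option Int))) :
    pvBuckets gs = (pvPairsL gs).foldl
      (fun d p => d.modify p.1 [] (fun l => l ++ [p.2])) PySem.Dict.empty := by
  simp only [pvBuckets, pvPairsL, List.foldl_flatMap, List.foldl_map]

lemma mem_pairsL (gs : List (PySem.Set (Option Int))) (t : Option Int) (i : Int) :
    (t, i) ∈ pvPairsL gs ↔ ∃ k : Nat, ∃ h : k < gs.length, i = (k : Int) ∧ t ∈ gs[k] := by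
  simp only [pvPairsL, List.mem_flatMap, List.mem_map, mem_enumerate]
  constructor
  · rintro ⟨ig, ⟨k, hk, rfl⟩, t', ht', heq⟩
    obtain ⟨rfl, rfl⟩ := Prod.mk.injEq .. ▸ heq
    exact ⟨k, hk, by omega, ht'⟩
  · rintro ⟨k, hk, rfl, ht⟩
    exact ⟨(0 + (k : Int), gs[k]), ⟨k, hk, rfl⟩, t, ht, by simp⟩

lemma mem_bucket (gs : List (PySem.Set (Option Int))) (t : Option Int) (i : Int) :
    i ∈ (pvBuckets gs).getD t [] ↔ (t, i) ∈ pvPairsL gs := by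
  rw [buckets_eq_flat, PySem.Dict.getD_foldl_modify_append]
  simp only [PySem.Dict.getD_empty, List.nil_append, List.mem_map, List.mem_filter]
  constructor
  · rintro ⟨⟨t', i'⟩, ⟨hp, ht⟩, rfl⟩
    obtain rfl : t' = t := by simpa using ht
    exact hp
  · intro hp
    exact ⟨(t, i), ⟨hp, by simp⟩, rfl⟩

lemma nodup_keys_buckets (gs : List (PySem.Set (Option Int))) : (pvBuckets gs).keys.Nodup := by
  rw [buckets_eq_flat]
  exact PySem.Dict.nodup_keys_foldl_modify_key (pvPairsL gs) (fun p => p.1) []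
    (fun _ x => fun l => l ++ [x.2]) PySem.Dict.empty (by simp)

lemma mem_keys_buckets (gs : List (PySem.Set (Option Int))) (t : Option Int) :
    t ∈ (pvBuckets gs).keys ↔ ∃ i, (t, i) ∈ pvPairsL gs := by
  rw [buckets_eq_flat,
    PySem.Dict.keys_foldl_modify_key (pvPairsL gs) (fun p => p.1) []
      (fun _ x => fun l => l ++ [x.2]) PySem.Dict.empty]
  simp only [PySem.Set.mem_update, PySem.Dict.keys_empty, List.not_mem_nil, false_or,
    List.mem_map]
  constructor
  · rintro ⟨⟨t', i⟩, hp, rfl⟩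
    exact ⟨i, hp⟩
  · rintro ⟨i, hp⟩
    exact ⟨(t, i), hp, rfl⟩

-- membership through the three covered-building folds
lemma mem_cov_inner (i : Int) (l : List Int) (s : PySem.Set (Int × Int)) (p : Int × Int) :
    p ∈ l.foldl (fun cov j => if i < j then PySem.Set.add cov (i, j) else cov) s ↔
      p ∈ s ∨ ∃ j ∈ l, i < j ∧ p = (i, j) := by
  induction l generalizing s with
  | nil => simp
  | cons j t ih =>
    simp only [List.foldl_cons, ih]
    by_cases h : i < j
    · simp only [if_pos h, PySem.Set.mem_add, List.mem_cons]
      constructor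
      · rintro (⟨hs | rfl⟩ | ⟨j', hj', hlt, rfl⟩)
        · exact Or.inl hs
        · exact Or.inr ⟨j, Or.inl rfl, h, rfl⟩
        · exact Or.inr ⟨j', Or.inr hj', hlt, rfl⟩
      · rintro (hs | ⟨j', rfl | hj', hlt, rfl⟩)
        · exact Or.inl (Or.inl hs)
        · exact Or.inl (Or.inr rfl)
        · exact Or.inr ⟨j', hj', hlt, rfl⟩
    · simp only [if_neg h, List.mem_cons]
      constructor
      · rintro (hs | ⟨j', hj', hlt, rfl⟩)
        · exact Or.inl hs
        · exact Or.inr ⟨j', Or.inr hj', hlt, rfl⟩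
      · rintro (hs | ⟨j', rfl | hj', hlt, rfl⟩)
        · exact Or.inl hs
        · exact absurd hlt h
        · exact Or.inr ⟨j', hj', hlt, rfl⟩

lemma mem_cov_mid (idxs : List Int) (l : List Int) (s : PySem.Set (Int × Int)) (p : Int × Int) :
    p ∈ l.foldl (fun cov i =>
        idxs.foldl (fun cov j => if i < j then PySem.Set.add cov (i, j) else cov) cov) s ↔
      p ∈ s ∨ ∃ i ∈ l, ∃ j ∈ idxs, i < j ∧ p = (i, j) := by
  induction l generalizing s with
  | nil => simp
  | cons i t ih =>
    simp only [List.foldl_cons, ih, mem_cov_inner i, List.mem_cons]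
    constructor
    · rintro (⟨hs | ⟨j, hj, hlt, rfl⟩⟩ | ⟨i', hi', j, hj, hlt, rfl⟩)
      · exact Or.inl hs
      · exact Or.inr ⟨i, Or.inl rfl, j, hj, hlt, rfl⟩
      · exact Or.inr ⟨i', Or.inr hi', j, hj, hlt, rfl⟩
    · rintro (hs | ⟨i', rfl | hi', j, hj, hlt, rfl⟩)
      · exact Or.inl (Or.inl hs)
      · exact Or.inl (Or.inr ⟨j, hj, hlt, rfl⟩)
      · exact Or.inr ⟨i', hi', j, hj, hlt, rfl⟩

lemma mem_cov_outer (vals : List (List Int)) (s : PySem.Set (Int × Int)) (p : Int × Int) :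
    p ∈ vals.foldl (fun cov idxs =>
        idxs.foldl (fun cov i =>
          idxs.foldl (fun cov j => if i < j then PySem.Set.add cov (i, j) else cov) cov) cov) s ↔
      p ∈ s ∨ ∃ idxs ∈ vals, ∃ i ∈ idxs, ∃ j ∈ idxs, i < j ∧ p = (i, j) := by
  induction vals generalizing s with
  | nil => simp
  | cons idxs t ih =>
    simp only [List.foldl_cons, ih, mem_cov_mid idxs idxs, List.mem_cons]
    constructor
    · rintro (⟨hs | ⟨i, hi, j, hj, hlt, rfl⟩⟩ | ⟨l', hl', rest⟩)
      · exact Or.inl hs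
      · exact Or.inr ⟨idxs, Or.inl rfl, i, hi, j, hj, hlt, rfl⟩
      · exact Or.inr ⟨l', Or.inr hl', rest⟩
    · rintro (hs | ⟨l', rfl | hl', rest⟩)
      · exact Or.inl (Or.inl hs)
      · exact Or.inl (Or.inr rest)
      · exact Or.inr ⟨l', hl', rest⟩

lemma foldl_inv {β σ : Type} (P : σ → Prop) (f : σ → β → σ)
    (h : ∀ s a, P s → P (f s a)) (l : List β) (s : σ) (hs : P s) : P (l.foldl f s) := by
  induction l generalizing s with
  | nil => exact hs
  | cons x t ih => exact ih _ (h _ _ hs)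

lemma nodup_covered (gs : List (PySem.Set (Option Int))) : (pvCovered gs).Nodup := by
  refine foldl_inv List.Nodup _ ?_ _ _ List.nodup_nil
  intro s idxs hs
  refine foldl_inv List.Nodup _ ?_ _ _ hs
  intro s i hs
  refine foldl_inv List.Nodup _ ?_ _ _ hs
  intro s j hs
  split
  · exact PySem.Set.nodup_add _ _ hs
  · exact hs

lemma mem_covered (gs : List (PySem.Set (Option Int))) (p : Int × Int) :
    p ∈ pvCovered gs ↔ ∃ a b : Nat, ∃ ha : a < gs.length, ∃ hb : b < gs.length,
      a < b ∧ p = ((a : Int), (b : Int)) ∧ pvShare gs[a] gs[b] := by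
  unfold pvCovered
  rw [mem_cov_outer,
    PySem.Dict.values_eq_map_keys (pvBuckets gs) (nodup_keys_buckets gs) []]
  simp only [PySem.Set.empty, List.not_mem_nil, false_or, List.mem_map]
  constructor
  · rintro ⟨idxs, ⟨t, htk, rfl⟩, i, hi, j, hj, hlt, rfl⟩
    rw [mem_bucket, mem_pairsL] at hi hj
    obtain ⟨a, ha, rfl, hta⟩ := hi
    obtain ⟨b, hb, rfl, htb⟩ := hj
    have hab : a < b := by exact_mod_cast hlt
    refine ⟨a, b, ha, hb, hab, rfl, ?_⟩
    exact List.ne_nil_of_mem ((PySem.Set.mem_inter _ _ t).mpr ⟨hta, htb⟩)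
  · rintro ⟨a, b, ha, hb, hab, rfl, hsh⟩
    obtain ⟨t, ht⟩ := List.exists_mem_of_ne_nil _ hsh
    obtain ⟨hta, htb⟩ := (PySem.Set.mem_inter _ _ t).mp ht
    have hpa : (t, (a : Int)) ∈ pvPairsL gs := (mem_pairsL gs t _).mpr ⟨a, ha, rfl, hta⟩
    have hpb : (t, (b : Int)) ∈ pvPairsL gs := (mem_pairsL gs t _).mpr ⟨b, hb, rfl, htb⟩
    refine ⟨(pvBuckets gs).getD t [], ⟨t, (mem_keys_buckets gs t).mpr ⟨_, hpa⟩, rfl⟩,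
      (a : Int), (mem_bucket gs t _).mpr hpa, (b : Int), (mem_bucket gs t _).mpr hpb,
      by exact_mod_cast hab, rfl⟩

lemma mem_allPairs (n : Nat) (p : Int × Int) :
    p ∈ pvAllPairs n ↔ ∃ a b : Nat, a < b ∧ b < n ∧ p = ((a : Int), (b : Int)) := by
  simp only [pvAllPairs, List.mem_flatMap, List.mem_range]
  constructor
  · rintro ⟨b, hb, hm⟩
    obtain ⟨a, ha, rfl⟩ := List.mem_map.mp hm
    exact ⟨a, b, List.mem_range.mp ha, hb, rfl⟩
  · rintro ⟨a, b, hab, hb, rfl⟩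
    exact ⟨b, hb, List.mem_map.mpr ⟨a, List.mem_range.mpr hab, rfl⟩⟩

lemma allPairs_succ (n : Nat) : pvAllPairs (n + 1) =
    pvAllPairs n ++ (List.range n).map (fun (a : Nat) => ((a : Int), (n : Int))) := by
  unfold pvAllPairs
  rw [List.range_succ, List.flatMap_append, List.flatMap_singleton]

lemma nodup_allPairs (n : Nat) : (pvAllPairs n).Nodup := by
  induction n with
  | zero => simp [pvAllPairs]
  | succ n ih =>
    rw [allPairs_succ]
    refine List.Nodup.append ih ?_ ?_
    · refine List.Nodup.map ?_ List.nodup_range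
      intro a b h
      simpa using h
    · intro p hp hp'
      obtain ⟨a, b, _, hb, rfl⟩ := (mem_allPairs n p).mp hp
      obtain ⟨a', _, heq⟩ := List.mem_map.mp hp'
      obtain ⟨-, h2⟩ := Prod.mk.injEq .. ▸ heq.symm
      have : b = n := by exact_mod_cast h2
      omega

lemma length_allPairs (n : Nat) : 2 * (pvAllPairs n).length = n * (n - 1) := by
  induction n with
  | zero => simp [pvAllPairs]
  | succ n ih =>
    rw [allPairs_succ, List.length_append, List.length_map, List.length_range,
      Nat.succ_sub_one]
    cases n with
    | zero => simp [pvAllPairs]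
    | succ m =>
      rw [Nat.succ_sub_one] at ih
      calc 2 * ((pvAllPairs (m + 1)).length + (m + 1))
          = 2 * (pvAllPairs (m + 1)).length + 2 * (m + 1) := by ring
        _ = (m + 1) * m + 2 * (m + 1) := by rw [ih]
        _ = (m + 1 + 1) * (m + 1) := by ring

lemma count_iff (cov all : List (Int × Int)) (hc : cov.Nodup) (ha : all.Nodup)
    (hsub : cov ⊆ all) : (cov.length = all.length ↔ ∀ p ∈ all, p ∈ cov) := by
  constructor
  · intro hlen p hp
    have hperm := (List.subperm_of_subset hc hsub).perm_of_length_le (le_of_eq hlen.symm)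
    exact hperm.mem_iff.mpr hp
  · intro hall
    have h1 := (List.subperm_of_subset hc hsub).length_le
    have h2 := (List.subperm_of_subset ha (fun p hp => hall p hp)).length_le
    omega

lemma b_core_iff (gs : List (PySem.Set (Option Int))) :
    ((pvCovered gs).length : Int) =
      PySem.Int.floordiv ((gs.length : Int) * ((gs.length : Int) - 1)) 2 ↔
    gs.Pairwise pvShare := by
  have h1 : ((gs.length : Int) * ((gs.length : Int) - 1))
      = ((gs.length * (gs.length - 1) : Nat) : Int) := by
    cases hN : gs.length with
    | zero => simp
    | succ m => push_cast [Nat.succ_sub_one]; ring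
  have h2 : PySem.Int.floordiv ((gs.length : Int) * ((gs.length : Int) - 1)) 2
      = ((gs.length * (gs.length - 1) / 2 : Nat) : Int) := by
    rw [h1]; exact_mod_cast PySem.Int.floordiv_natCast (gs.length * (gs.length - 1)) 2
  rw [h2, Int.natCast_inj]
  have hlen : gs.length * (gs.length - 1) / 2 = (pvAllPairs gs.length).length := by
    have := length_allPairs gs.length; omega
  rw [hlen]
  have hsub : pvCovered gs ⊆ pvAllPairs gs.length := by
    intro p hp
    obtain ⟨a, b, ha, hb, hab, rfl, hsh⟩ := (mem_covered gs p).mp hp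
    exact (mem_allPairs gs.length _).mpr ⟨a, b, hab, hb, rfl⟩
  rw [count_iff _ _ (nodup_covered gs) (nodup_allPairs gs.length) hsub,
    List.pairwise_iff_getElem]
  constructor
  · intro h i j hi hj hij
    have hmem := h ((i : Int), (j : Int))
      ((mem_allPairs gs.length _).mpr ⟨i, j, hij, hj, rfl⟩)
    obtain ⟨a, b, ha, hb, hab, heq, hsh⟩ := (mem_covered gs _).mp hmem
    obtain ⟨hia, hjb⟩ := Prod.mk.injEq .. ▸ heq
    obtain rfl : i = a := by exact_mod_cast hia
    obtain rfl : j = b := by exact_mod_cast hjb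
    exact hsh
  · intro h p hp
    obtain ⟨a, b, hab, hb, rfl⟩ := (mem_allPairs gs.length _).mp hp
    exact (mem_covered gs _).mpr ⟨a, b, lt_trans hab hb, hb, hab, rfl,
      h a b (lt_trans hab hb) hb hab⟩

-- ===== VERDICT (by name: the statement is the Claim_ definition above) =====
theorem are_taxonomy_consistent_spec : Claim_equal_are_taxonomy_consistent := by
  intro sve_map _
  show are_taxonomy_consistent sve_map = are_taxonomy_consistent_alt sve_map
  simp only [are_taxonomy_consistent, are_taxonomy_consistent_alt]
  rw [PySem.List.foldl_append_singleton_eq_map, List.nil_append]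
  rw [Bool.eq_iff_iff, a_fold_iff, decide_eq_true_iff]
  exact (b_core_iff (sve_map.map (fun sves => PySem.Set.ofList (sves.2.map
    (fun sve => PySem.Dict.get? (PySem.Dict.mk sve) "taxonomy"))))).symm
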